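-- pv_equiv track=rewrite | github.com/6422chaitra/Chaitra-S | index.py | find_index_of_zero
-- ===== SOURCE A (Python) =====
-- def find_index_of_zero(arr):
--     max_count = 0       # Maximum length of continuous 1s found so far
--     max_index = -1      # Index of zero to replace
--     prev_zero = -1      # Index of previous zero
--     prev_prev_zero = -1 # Index of zero before the previous zero
--
--     for i, val in enumerate(arr):
--         if val == 0:
--             # Update the zero positions
--             prev_prev_zero = prev_zero
--             prev_zero = i
--
--         # Calculate the length of the current sequence of 1s with at most one zero replaced
--         if i - prev_prev_zero > max_count:
--             max_count = i - prev_prev_zero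
--             max_index = prev_zero
--
--     return max_index
-- ===== SOURCE B (Python) =====
-- def find_index_of_zero(arr):
--     n = len(arr)
--     zeros = [i for i, v in enumerate(arr) if v == 0]
--     best_run, best_idx, prev = 0, -1, -1
--     for z, nxt in zip(zeros, zeros[1:] + [n]):
--         run = nxt - prev - 1
--         if run > best_run:
--             best_run, best_idx = run, z
--         prev = z
--     return best_idx
-- ===== Notes on version B (the rewrite author's own statement) =====
-- stated objective: simpler
-- what changed: A's single scan with four running variables (max_count, max_index, prev_zero, prev_prev_zero) is replaced by first collecting the zero positions and then one pass over (zero, next-zero-or-n) pairs carrying only the previous zero, scoring each zero's run nxt - prev - 1 directly.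
import Mathlib
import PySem

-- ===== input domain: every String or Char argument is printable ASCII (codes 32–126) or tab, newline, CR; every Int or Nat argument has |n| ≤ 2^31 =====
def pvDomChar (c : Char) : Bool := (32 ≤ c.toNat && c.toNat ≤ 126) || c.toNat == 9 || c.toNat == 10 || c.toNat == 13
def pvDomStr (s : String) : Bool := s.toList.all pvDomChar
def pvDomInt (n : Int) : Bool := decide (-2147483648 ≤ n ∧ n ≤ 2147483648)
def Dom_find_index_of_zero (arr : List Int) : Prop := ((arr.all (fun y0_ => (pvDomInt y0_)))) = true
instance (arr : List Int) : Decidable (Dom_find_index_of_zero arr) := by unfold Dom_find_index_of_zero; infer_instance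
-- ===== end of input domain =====

-- B rewrites A's four-variable single scan as: collect the zero positions, then one pass over
-- (zero, next-zero-or-n) pairs carrying the previous zero, keeping the earliest zero whose run
-- strictly beats the best (objective: simpler decomposition, same O(n) cost).

-- ===== PORT A =====
-- state: (max_count, max_index, prev_zero, prev_prev_zero)
def stepA (st : Int × Int × Int × Int) (p : Int × Int) : Int × Int × Int × Int :=
  let mc := st.1; let mi := st.2.1; let pz := st.2.2.1; let ppz := st.2.2.2
  let pz' := if p.2 = 0 then p.1 else pz
  let ppz' := if p.2 = 0 then pz else ppz
  if p.1 - ppz' > mc then (p.1 - ppz', pz', pz', ppz') else (mc, mi, pz', ppz')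

def find_index_of_zero (arr : List Int) : Int :=
  ((PySem.List.enumerate arr 0).foldl stepA (0, -1, -1, -1)).2.1

-- ===== PORT B =====
-- state: (best_run, best_idx, prev)
def stepB (st : Int × Int × Int) (p : Int × Int) : Int × Int × Int :=
  let run := p.2 - st.2.2 - 1
  if run > st.1 then (run, p.1, p.1) else (st.1, st.2.1, p.1)

def find_index_of_zero_alt (arr : List Int) : Int :=
  let n : Int := arr.length
  let zeros : List Int := ((PySem.List.enumerate arr 0).filter (fun p => p.2 == 0)).map (fun p => p.1)
  ((zeros.zip (zeros.drop 1 ++ [n])).foldl stepB (0, -1, -1)).2.1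

-- ===== PRECONDITION & SPEC =====
def Spec_find_index_of_zero (arr : List Int) (out : Int) : Prop := out = find_index_of_zero_alt arr
instance (arr : List Int) (out : Int) : Decidable (Spec_find_index_of_zero arr out) := by unfold Spec_find_index_of_zero; infer_instance

-- ===== CLAIM (what is proved, stated in full; the proofs are below) =====
def Claim_equal_find_index_of_zero : Prop := ∀ (arr : List Int), Dom_find_index_of_zero arr → Spec_find_index_of_zero arr (find_index_of_zero arr)

-- ===== LEMMAS AND PROOFS =====

-- the zero positions of l, where l starts at absolute index i
def zerosFrom (i : Int) : List Int → List Int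
  | [] => []
  | v :: t => if v = 0 then i :: zerosFrom (i + 1) t else zerosFrom (i + 1) t

-- recursive form of B's zip-fold: Cf st zs n runs stepB over zip zs (zs.tail ++ [n])
def Cf (st : Int × Int × Int) (zs : List Int) (n : Int) : Int × Int × Int :=
  match zs with
  | [] => st
  | z :: rest => Cf (stepB st (z, rest.headD n)) rest n

theorem zerosFrom_eq (l : List Int) : ∀ (i : Int),
    zerosFrom i l = ((PySem.List.enumerate l i).filter (fun p => p.2 == 0)).map (fun p => p.1) := by
  induction l with
  | nil => intro i; simp [zerosFrom, PySem.List.enumerate_nil]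
  | cons v t ih =>
    intro i
    simp only [zerosFrom, PySem.List.enumerate_cons, List.filter_cons]
    by_cases h : v = 0 <;> simp [h, ih (i + 1)]

theorem Cf_eq (zs : List Int) : ∀ (st : Int × Int × Int) (n : Int),
    (zs.zip (zs.drop 1 ++ [n])).foldl stepB st = Cf st zs n := by
  induction zs with
  | nil => intro st n; simp [Cf]
  | cons z rest ih =>
    intro st n
    have hz : (z :: rest).zip ((z :: rest).drop 1 ++ [n])
        = (z, rest.headD n) :: rest.zip (rest.drop 1 ++ [n]) := by
      cases rest <;> simp
    rw [hz, List.foldl_cons, ih]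
    rfl

-- every zero position in zerosFrom i l (with default i + |l|) is ≥ i
theorem zerosFrom_headD_ge (l : List Int) : ∀ (i : Int),
    i ≤ (zerosFrom i l).headD (i + l.length) := by
  induction l with
  | nil => intro i; simp [zerosFrom]
  | cons v t ih =>
    intro i
    simp only [zerosFrom, List.length_cons]
    by_cases h : v = 0
    · simp [h]
    · have hd : i + ((t.length : Int) + 1) = (i + 1) + (t.length : Int) := by ring
      have := ih (i + 1)
      rw [if_neg h]
      push_cast
      rw [hd]
      omega

-- the first element of zerosFrom j t is ≥ j and below the next one (default j + |t|)
theorem zerosFrom_head_facts (t : List Int) : ∀ (j z : Int) (r : List Int),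
    zerosFrom j t = z :: r → j ≤ z ∧ z < r.headD (j + t.length) := by
  induction t with
  | nil => intro j z r h; simp [zerosFrom] at h
  | cons v t' ih =>
    intro j z r h
    simp only [zerosFrom] at h
    have hd : j + (((v :: t').length : Int)) = (j + 1) + (t'.length : Int) := by
      simp; ring
    rw [hd]
    by_cases hv : v = 0
    · rw [if_pos hv] at h
      cases h
      have := zerosFrom_headD_ge t' (j + 1)
      exact ⟨le_refl _, by omega⟩
    · rw [if_neg hv] at h
      have := ih (j + 1) z r h
      exact ⟨by omega, by omega⟩

-- absorbing a pending candidate (value c, index = the head zero j) into Cf's entry state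
theorem Cf_absorb (zs : List Int) (n br bi prev c j : Int)
    (h : c ≤ zs.headD n - prev - 1) :
    Cf ((if c > br then c else br), (if c > br then j else bi), prev) (j :: zs) n
      = Cf (br, bi, prev) (j :: zs) n := by
  simp only [Cf, stepB]
  have : (if zs.headD n - prev - 1 > (if c > br then c else br)
            then (zs.headD n - prev - 1, j, j)
            else ((if c > br then c else br), (if c > br then j else bi), j))
        = (if zs.headD n - prev - 1 > br then (zs.headD n - prev - 1, j, j) else (br, bi, j)) := by
    split_ifs <;> simp only [Prod.mk.injEq, and_true] <;> omega
  rw [this]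

-- main invariant: A's scan over the suffix starting at i equals Cf entered with the
-- still-open zero pz pushed in front of the suffix's zero list
theorem main_inv (l : List Int) : ∀ (i mc mi pz ppz : Int),
    i - 1 - ppz ≤ mc → pz ≤ i - 1 → ppz ≤ pz →
    ((PySem.List.enumerate l i).foldl stepA (mc, mi, pz, ppz)).2.1
      = (Cf (mc, mi, ppz) (pz :: zerosFrom i l) (i + l.length)).2.1 := by
  induction l with
  | nil =>
    intro i mc mi pz ppz h1 h2 h3
    simp only [PySem.List.enumerate_nil, List.foldl_nil, zerosFrom, Cf, stepB,
      List.length_nil, List.headD_nil]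
    rw [if_neg (by omega : ¬ (i + (0:Nat) - ppz - 1 > mc))]
  | cons v t ih =>
    intro i mc mi pz ppz h1 h2 h3
    rw [PySem.List.enumerate_cons, List.foldl_cons]
    have hlen : i + (((v :: t).length : Int)) = (i + 1) + (t.length : Int) := by
      simp; ring
    by_cases hv : v = 0
    · -- a zero at index i
      have hstep : stepA (mc, mi, pz, ppz) (i, v)
          = ((if i - pz > mc then i - pz else mc), (if i - pz > mc then i else mi), i, pz) := by
        simp only [stepA, hv]
        split_ifs <;> simp_all
      rw [hstep,
        ih (i + 1) _ _ i pz (by split_ifs <;> omega) (by omega) (by omega)]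
      have hz : zerosFrom i (v :: t) = i :: zerosFrom (i + 1) t := by simp [zerosFrom, hv]
      rw [hz, hlen]
      -- right side: first Cf step on pz is a no-op (run = i - ppz - 1 ≤ mc)
      conv_rhs => rw [Cf]
      simp only [stepB, List.headD_cons]
      rw [if_neg (by omega : ¬ (i - ppz - 1 > mc))]
      -- now absorb the pending candidate c = i - pz at index i
      rw [Cf_absorb (zerosFrom (i+1) t) ((i+1) + (t.length:Int)) mc mi pz (i - pz) i
        (by have := zerosFrom_headD_ge t (i + 1); omega)]
    · -- a non-zero at index i
      have hstep : stepA (mc, mi, pz, ppz) (i, v)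
          = ((if i - ppz > mc then i - ppz else mc), (if i - ppz > mc then pz else mi), pz, ppz) := by
        simp only [stepA, hv]
        split_ifs <;> simp_all
      rw [hstep,
        ih (i + 1) _ _ pz ppz (by split_ifs <;> omega) (by omega) h3]
      have hz : zerosFrom i (v :: t) = zerosFrom (i + 1) t := by simp [zerosFrom, hv]
      rw [hz, hlen,
        Cf_absorb (zerosFrom (i+1) t) ((i+1) + (t.length:Int)) mc mi ppz (i - ppz) pz
          (by have := zerosFrom_headD_ge t (i + 1); omega)]

-- dropping the initial sentinel zero -1: with a first real zero the states coincide after one step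
theorem sentinel_drop (l : List Int) :
    (Cf (0, -1, -1) ((-1) :: zerosFrom 0 l) ((l.length : Int))).2.1
      = (Cf (0, -1, -1) (zerosFrom 0 l) ((l.length : Int))).2.1 := by
  rcases hzs : zerosFrom 0 l with _ | ⟨z0, rest⟩
  · simp only [Cf, stepB, List.headD_nil]
    split_ifs <;> rfl
  · have hf := zerosFrom_head_facts l 0 z0 rest hzs
    simp only [zero_add] at hf
    obtain ⟨hz0, hnext⟩ := hf
    simp only [Cf, List.headD_cons]
    have hstep : stepB (stepB (0, -1, -1) ((-1 : Int), z0)) (z0, rest.headD (l.length : Int))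
        = stepB (0, -1, -1) (z0, rest.headD (l.length : Int)) := by
      simp only [stepB]
      by_cases h0 : z0 - (-1) - 1 > 0
      · rw [if_pos h0]
        rw [if_pos (show rest.headD (l.length : Int) - (-1) - 1 > z0 - (-1) - 1 by omega),
          if_pos (show rest.headD (l.length : Int) - (-1) - 1 > (0 : Int) by omega)]
      · rw [if_neg h0]
    rw [hstep]

-- ===== VERDICT (by name: the statement is the Claim_ definition above) =====
theorem find_index_of_zero_spec : Claim_equal_find_index_of_zero := by
  intro arr _
  show find_index_of_zero arr = find_index_of_zero_alt arr
  have hB : find_index_of_zero_alt arr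
      = (Cf (0, -1, -1) (zerosFrom 0 arr) ((arr.length : Int))).2.1 := by
    simp only [find_index_of_zero_alt]
    rw [← zerosFrom_eq arr 0, Cf_eq]
  have hA := main_inv arr 0 0 (-1) (-1) (-1) (by omega) (by omega) (by omega)
  unfold find_index_of_zero
  rw [hA, hB]
  simpa using sentinel_drop arr
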